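-- pv_equiv track=rewrite | github.com/alxtrtw/python-excercises | leetcode-top-150/68.py | get_gap_lens
-- ===== SOURCE A (Python) =====
-- def get_gap_lens(n_spaces, n_gaps):
--     gap_len = n_spaces // n_gaps
--     gap_mod = n_spaces % n_gaps
--     gap_lens = [gap_len for _ in range(n_gaps)]
--     if gap_mod != 0:
--         for i in range(gap_mod):
--             gap_lens[i] += 1
--     return gap_lens + [0]
-- ===== SOURCE B (Python) =====
-- def get_gap_lens(n_spaces, n_gaps):
--     # Greedy residual distribution: each gap takes the ceiling of its fair
--     # share of the REMAINING spaces; the remainder spreads itself out.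
--     gap_lens = []
--     while n_gaps > 0:
--         g = -(-n_spaces // n_gaps)  # ceil(n_spaces / n_gaps)
--         gap_lens.append(g)
--         n_spaces -= g
--         n_gaps -= 1
--     gap_lens.append(0)
--     return gap_lens
-- ===== Notes on version B (the rewrite author's own statement) =====
-- stated objective: alternative
-- what changed: Replaces A's divmod-based two-phase construction (constant list then per-index increment loop) with a greedy single loop that gives each gap the ceiling of its fair share of the remaining spaces and recurses on the residual, with no divmod/remainder bookkeeping at all.
import Mathlib
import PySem

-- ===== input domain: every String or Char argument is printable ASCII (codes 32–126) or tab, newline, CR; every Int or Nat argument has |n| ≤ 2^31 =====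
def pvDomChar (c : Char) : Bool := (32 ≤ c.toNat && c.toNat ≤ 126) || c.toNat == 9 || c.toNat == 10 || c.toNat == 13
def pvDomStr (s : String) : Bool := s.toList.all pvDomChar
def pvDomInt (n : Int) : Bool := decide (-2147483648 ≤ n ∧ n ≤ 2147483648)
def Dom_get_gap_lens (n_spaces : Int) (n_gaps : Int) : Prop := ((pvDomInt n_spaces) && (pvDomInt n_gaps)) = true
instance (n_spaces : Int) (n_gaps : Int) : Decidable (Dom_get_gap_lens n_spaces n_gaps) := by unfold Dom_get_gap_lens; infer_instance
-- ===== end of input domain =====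

-- B replaces A's divmod-then-increment construction by a greedy loop: each gap takes the
-- ceiling of its fair share of the REMAINING spaces (objective: alternative algorithm).

-- ===== PORT A =====
def get_gap_lens (n_spaces : Int) (n_gaps : Int) : List Int :=
  let gap_len := PySem.Int.floordiv n_spaces n_gaps
  let gap_mod := PySem.Int.mod n_spaces n_gaps
  let gap_lens := (PySem.List.pyRange 0 n_gaps 1).map (fun _ => gap_len)
  let gap_lens :=
    if gap_mod ≠ 0 then
      (PySem.List.pyRange 0 gap_mod 1).foldl
        (fun acc i => acc.set i.toNat (acc.getD i.toNat 0 + 1)) gap_lens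
    else gap_lens
  gap_lens ++ [0]

-- ===== PORT B =====
-- while n_gaps > 0: append ceil(n_spaces/n_gaps), subtract it, decrement; then append 0.
def gglLoop (n_spaces : Int) (n_gaps : Int) : List Int :=
  if h : 0 < n_gaps then
    let g := -(PySem.Int.floordiv (-n_spaces) n_gaps)
    g :: gglLoop (n_spaces - g) (n_gaps - 1)
  else [0]
termination_by n_gaps.toNat
decreasing_by omega

def get_gap_lens_alt (n_spaces : Int) (n_gaps : Int) : List Int :=
  gglLoop n_spaces n_gaps

-- ===== PRECONDITION & SPEC =====
-- Python A raises ZeroDivisionError at n_gaps == 0; excluded here.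
def Pre_get_gap_lens (n_spaces : Int) (n_gaps : Int) : Prop := n_gaps ≠ 0
instance (n_spaces : Int) (n_gaps : Int) : Decidable (Pre_get_gap_lens n_spaces n_gaps) := by unfold Pre_get_gap_lens; infer_instance
def pvWitness_get_gap_lens : Int × Int := (7, 3)

def Spec_get_gap_lens (n_spaces : Int) (n_gaps : Int) (out : List Int) : Prop := out = get_gap_lens_alt n_spaces n_gaps
instance (n_spaces : Int) (n_gaps : Int) (out : List Int) : Decidable (Spec_get_gap_lens n_spaces n_gaps out) := by unfold Spec_get_gap_lens; infer_instance

-- ===== CLAIM (what is proved, stated in full; the proofs are below) =====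
def Claim_equal_get_gap_lens : Prop := ∀ (n_spaces : Int) (n_gaps : Int), Dom_get_gap_lens n_spaces n_gaps → Pre_get_gap_lens n_spaces n_gaps → Spec_get_gap_lens n_spaces n_gaps (get_gap_lens n_spaces n_gaps)

-- ===== LEMMAS AND PROOFS =====

-- The common closed form both programs reach (used only inside the proofs).
def gglCF (n_spaces : Int) (n_gaps : Int) : List Int :=
  List.replicate (PySem.Int.mod n_spaces n_gaps).toNat (PySem.Int.floordiv n_spaces n_gaps + 1)
    ++ List.replicate (n_gaps - PySem.Int.mod n_spaces n_gaps).toNat (PySem.Int.floordiv n_spaces n_gaps)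
    ++ [0]

-- A's increment loop over range(0, k) turns the first k cells of a constant list into q+1.
lemma foldl_incr_replicate (q : Int) (k n : Nat) (h : k ≤ n) :
    (PySem.List.pyRange 0 (k : Int) 1).foldl
      (fun acc i => acc.set i.toNat (acc.getD i.toNat 0 + 1)) (List.replicate n q)
    = List.replicate k (q + 1) ++ List.replicate (n - k) q := by
  induction k with
  | zero => simp [PySem.List.pyRange_one_eq_nil]
  | succ k ih =>
    have hk : k ≤ n := Nat.le_of_succ_le h
    have hsplit : PySem.List.pyRange 0 ((k : Int) + 1) 1
        = PySem.List.pyRange 0 (k : Int) 1 ++ [(k : Int)] :=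
      PySem.List.pyRange_one_succ_right (by exact_mod_cast Nat.zero_le k)
    have hcast : ((k + 1 : Nat) : Int) = (k : Int) + 1 := by push_cast; ring
    rw [hcast, hsplit, List.foldl_append, ih hk]
    simp only [List.foldl_cons, List.foldl_nil, Int.toNat_natCast]
    have hnk : n - k = (n - (k + 1)) + 1 := by omega
    rw [hnk, List.replicate_succ]
    have hlen : (List.replicate k (q + 1)).length = k := List.length_replicate
    have hgd : (List.replicate k (q + 1) ++ q :: List.replicate (n - (k + 1)) q).getD k 0 = q := by
      rw [← hlen]; simp [List.getD_eq_getElem?_getD]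
    rw [hgd]
    have hset : (List.replicate k (q + 1) ++ q :: List.replicate (n - (k + 1)) q).set k (q + 1)
        = List.replicate k (q + 1) ++ (q + 1) :: List.replicate (n - (k + 1)) q := by
      rw [← hlen]; simp
    rw [hset, List.replicate_succ' (n := k)]
    simp

-- A equals the closed form (for n_gaps < 0 both collapse to [0]).
lemma A_eq_cf (n_spaces n_gaps : Int) (hg : n_gaps ≠ 0) :
    get_gap_lens n_spaces n_gaps = gglCF n_spaces n_gaps := by
  unfold get_gap_lens gglCF
  set q := PySem.Int.floordiv n_spaces n_gaps with hq
  set m := PySem.Int.mod n_spaces n_gaps with hm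
  rcases lt_or_gt_of_ne hg with hneg | hpos
  · obtain ⟨h1, h2⟩ := PySem.Int.mod_neg_bounds n_spaces hneg
    rw [← hm] at h1 h2
    have hr : PySem.List.pyRange 0 n_gaps 1 = [] :=
      PySem.List.pyRange_one_eq_nil (le_of_lt hneg)
    have hr2 : PySem.List.pyRange 0 m 1 = [] :=
      PySem.List.pyRange_one_eq_nil h2
    have ht : (n_gaps - m).toNat = 0 := by omega
    have ht2 : m.toNat = 0 := by omega
    simp [hr, hr2, ht, ht2, ite_self]
  · have h0 : 0 ≤ m := hm ▸ PySem.Int.mod_nonneg n_spaces hpos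
    have hlt : m < n_gaps := hm ▸ PySem.Int.mod_lt n_spaces hpos
    have hconst : (PySem.List.pyRange 0 n_gaps 1).map (fun _ => q)
        = List.replicate n_gaps.toNat q := by
      rw [List.map_const']
      rw [PySem.List.length_pyRange_one]
      congr 1; omega
    have hmc : (m.toNat : Int) = m := Int.toNat_of_nonneg h0
    have hle : m.toNat ≤ n_gaps.toNat := by omega
    have hsub : (n_gaps - m).toNat = n_gaps.toNat - m.toNat := by omega
    by_cases hm0 : m = 0
    · simp [hm0, hconst]
    · simp only [ne_eq, hm0, not_false_eq_true, if_true, hconst]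
      rw [← hmc, foldl_incr_replicate q m.toNat n_gaps.toNat hle, hmc, hsub]

-- B's greedy loop equals the closed form, by induction on the number of gaps.
lemma loop_eq_cf : ∀ (k : Nat) (ns : Int),
    gglLoop ns ((k : Int) + 1) = gglCF ns ((k : Int) + 1) := by
  intro k
  induction k with
  | zero =>
    intro ns
    simp only [Nat.cast_zero, zero_add]
    have hpos : (0 : Int) < 1 := by norm_num
    have h0 : 0 ≤ PySem.Int.mod ns 1 := PySem.Int.mod_nonneg ns hpos
    have hlt : PySem.Int.mod ns 1 < 1 := PySem.Int.mod_lt ns hpos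
    have hm : PySem.Int.mod ns 1 = 0 := by omega
    have heq : ns = PySem.Int.floordiv ns 1 * 1 + PySem.Int.mod ns 1 :=
      (PySem.Int.floordiv_mul_add_mod ns 1).symm
    have hg : -(PySem.Int.floordiv (-ns) 1) = PySem.Int.floordiv ns 1 := by
      rw [PySem.Int.neg_floordiv_neg_eq_iff_of_pos hpos]
      constructor <;> nlinarith
    rw [gglLoop, dif_pos hpos]
    show (-(PySem.Int.floordiv (-ns) 1))
        :: gglLoop (ns - -(PySem.Int.floordiv (-ns) 1)) (1 - 1) = gglCF ns 1
    rw [gglLoop, dif_neg (by norm_num : ¬ (0 : Int) < 1 - 1), hg]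
    unfold gglCF
    rw [hm]
    norm_num
  | succ k ih =>
    intro ns
    have hcast : ((k + 1 : Nat) : Int) = (k : Int) + 1 := by push_cast; ring
    rw [hcast]
    set d : Int := (k : Int) + 1 + 1 with hd
    have hpos : (0 : Int) < d := by omega
    set q := PySem.Int.floordiv ns d with hq
    set m := PySem.Int.mod ns d with hmm
    have h0 : 0 ≤ m := hmm ▸ PySem.Int.mod_nonneg ns hpos
    have hlt : m < d := hmm ▸ PySem.Int.mod_lt ns hpos
    have heq : ns = q * d + m := by
      rw [hq, hmm]; exact (PySem.Int.floordiv_mul_add_mod ns d).symm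
    -- first gap: ceiling of ns / d
    have hg : -(PySem.Int.floordiv (-ns) d) = (if m = 0 then q else q + 1) := by
      rw [PySem.Int.neg_floordiv_neg_eq_iff_of_pos hpos]
      by_cases hm0 : m = 0
      · simp only [hm0, if_true]
        constructor <;> nlinarith
      · have hmpos : 0 < m := lt_of_le_of_ne h0 (Ne.symm hm0)
        simp only [hm0, if_false]
        constructor <;> nlinarith
    rw [gglLoop, dif_pos hpos]
    show (-(PySem.Int.floordiv (-ns) d))
        :: gglLoop (ns - -(PySem.Int.floordiv (-ns) d)) (d - 1) = gglCF ns d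
    rw [hg]
    have hd1 : d - 1 = (k : Int) + 1 := by omega
    by_cases hm0 : m = 0
    · -- residual ns - q over k+1 gaps: quotient stays q, remainder 0
      simp only [hm0, if_true]
      have hq' : PySem.Int.floordiv (ns - q) ((k : Int) + 1) = q := by
        rw [PySem.Int.floordiv_eq_iff_of_pos (by omega : (0:Int) < (k : Int) + 1)]
        constructor <;> nlinarith
      have hm' : PySem.Int.mod (ns - q) ((k : Int) + 1) = 0 := by
        have h := PySem.Int.floordiv_mul_add_mod (ns - q) ((k : Int) + 1)
        rw [hq'] at h; nlinarith
      rw [hd1, ih (ns - q)]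
      unfold gglCF
      rw [hq', hm', ← hq, ← hmm, hm0]
      have h1 : ((k : Int) + 1 - 0).toNat = k + 1 := by omega
      have h2 : d.toNat = k + 2 := by omega
      simp only [sub_zero, h1, h2, List.replicate_succ]
      simp [List.replicate_succ]
    · -- residual ns - (q+1) over k+1 gaps: quotient stays q, remainder m-1
      have hmpos : 0 < m := lt_of_le_of_ne h0 (Ne.symm hm0)
      simp only [hm0, if_false]
      have hq' : PySem.Int.floordiv (ns - (q + 1)) ((k : Int) + 1) = q := by
        rw [PySem.Int.floordiv_eq_iff_of_pos (by omega : (0:Int) < (k : Int) + 1)]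
        constructor <;> nlinarith
      have hm' : PySem.Int.mod (ns - (q + 1)) ((k : Int) + 1) = m - 1 := by
        have h := PySem.Int.floordiv_mul_add_mod (ns - (q + 1)) ((k : Int) + 1)
        rw [hq'] at h; nlinarith
      rw [hd1, ih (ns - (q + 1))]
      unfold gglCF
      rw [hq', hm', ← hq, ← hmm]
      have h1 : m.toNat = (m - 1).toNat + 1 := by omega
      have h2 : ((k : Int) + 1 - (m - 1)).toNat = (d - m).toNat := by omega
      rw [h1, h2, List.replicate_succ]
      simp

lemma B_eq_cf (n_spaces n_gaps : Int) (hg : n_gaps ≠ 0) :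
    get_gap_lens_alt n_spaces n_gaps = gglCF n_spaces n_gaps := by
  unfold get_gap_lens_alt
  rcases lt_or_gt_of_ne hg with hneg | hpos
  · obtain ⟨h1, h2⟩ := PySem.Int.mod_neg_bounds n_spaces hneg
    rw [gglLoop, dif_neg (by omega)]
    unfold gglCF
    have ht : (n_gaps - PySem.Int.mod n_spaces n_gaps).toNat = 0 := by omega
    have ht2 : (PySem.Int.mod n_spaces n_gaps).toNat = 0 := by omega
    simp [ht, ht2]
  · have hk : n_gaps = ((n_gaps.toNat - 1 : Nat) : Int) + 1 := by omega
    rw [hk]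
    exact loop_eq_cf (n_gaps.toNat - 1) n_spaces

-- ===== VERDICT (by name: the statements are the Claim_ definitions above) =====
theorem get_gap_lens_spec : Claim_equal_get_gap_lens := by
  intro n_spaces n_gaps _ hpre
  unfold Spec_get_gap_lens
  rw [A_eq_cf n_spaces n_gaps hpre, B_eq_cf n_spaces n_gaps hpre]
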